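-- pv_equiv track=rewrite | github.com/sumukhprasad/dips-codejam-2024 | 06-does-this-fizzbuzz/sampleSolution.py | solve
-- ===== SOURCE A (Python) =====
-- def solve(arr):
-- 	import math
-- 	arr = arr.split()
-- 	int_arr = []
-- 	for i in arr:
-- 		if i.isdigit():
-- 			int_arr.append(int(i))
-- 		else:
-- 			int_arr.append(None)
--
-- 	for i in range(len(int_arr)):
-- 		if type(int_arr[i])==int:
-- 			int_arr = list(range( int_arr[i]-i, int_arr[i]-i+len(int_arr) ))
-- 			break
--
-- 	fizz_terms = []
-- 	buzz_terms = []
--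
-- 	for i in range(len(int_arr)):
-- 		if "Fizz" in arr[i]:
-- 			fizz_terms.append(int_arr[i])
-- 		if "Buzz" in arr[i]:
-- 			buzz_terms.append(int_arr[i])
--
-- 	if fizz_terms == buzz_terms == []:
-- 		return True
--
-- 	gcd_f, gcd_b = math.gcd(*fizz_terms), math.gcd(*buzz_terms)
--
-- 	if gcd_f == 1 or gcd_b == 1:
-- 		return False
--
-- 	return True
-- ===== SOURCE B (Python) =====
-- def solve(arr):
--     import math
--     toks = arr.split()
--     fizz = [j for j, t in enumerate(toks) if "Fizz" in t]
--     buzz = [j for j, t in enumerate(toks) if "Buzz" in t]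
--     if not fizz and not buzz:
--         return True
--     start = None
--     for j, t in enumerate(toks):
--         if t.isdigit():
--             start = int(t) - j
--             break
--
--     def g(idxs):
--         # gcd of the reconstructed values = gcd(anchor value, gaps between positions)
--         if not idxs:
--             return 0
--         d = 0
--         for a, b in zip(idxs, idxs[1:]):
--             d = math.gcd(d, b - a)
--         return math.gcd(start + idxs[0], d)
--
--     return g(fizz) != 1 and g(buzz) != 1
-- ===== Notes on version B (the rewrite author's own statement) =====
-- stated objective: alternative
-- what changed: B never reconstructs the integer sequence: it collects the positions of Fizz/Buzz tokens and computes each group's gcd as gcd(anchor value at the first marked position, gcd of the gaps between consecutive marked positions), using gcd(v0,v1,..,vk)=gcd(v0, v1-v0, .., vk-v(k-1)); A instead rebuilds the full value list with range() and feeds the collected value lists to variadic math.gcd.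
import Mathlib
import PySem

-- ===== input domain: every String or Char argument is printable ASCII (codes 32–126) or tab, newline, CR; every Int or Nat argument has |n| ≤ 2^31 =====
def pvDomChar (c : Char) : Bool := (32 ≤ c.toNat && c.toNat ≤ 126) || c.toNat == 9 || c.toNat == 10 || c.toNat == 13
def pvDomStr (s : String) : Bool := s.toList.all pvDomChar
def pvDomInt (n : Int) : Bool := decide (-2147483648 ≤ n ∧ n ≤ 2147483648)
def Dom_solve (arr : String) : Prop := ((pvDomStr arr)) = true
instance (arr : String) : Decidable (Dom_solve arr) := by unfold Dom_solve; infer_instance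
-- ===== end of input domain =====

-- B never rebuilds the integer sequence: each group's gcd is gcd(anchor value, gaps between
-- the marked positions), via gcd(v0,..,vk) = gcd(v0, v1-v0, .., vk-v(k-1)); return values agree on Pre_.

-- ===== PORT A =====
-- int(t); both Pythons call it only after t.isdigit(), so ofStr? always succeeds where it is reached
def pyIntOf (t : String) : Int := (PySem.Int.ofStr? t).getD 0

-- A's second loop: first index i whose entry is an int, with its value
def solveFindA : List (Option Int) → Int → Option (Int × Int)
  | [], _ => none
  | some v :: _, i => some (v, i)
  | none :: rest, i => solveFindA rest (i + 1)

-- math.gcd(*terms): left gcd fold from 0; a None term raises TypeError in Python (outside Pre_solve), here .getD 0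
def gcdL (l : List (Option Int)) : Nat := l.foldl (fun g t => Nat.gcd g (t.getD 0).natAbs) 0

-- A's third loop body: append int_arr[i] to fizz_terms / buzz_terms
def aStep (p : List (Option Int) × List (Option Int)) (ti : String × Option Int) :
    List (Option Int) × List (Option Int) :=
  (if PySem.Str.isIn "Fizz" ti.1 then p.1 ++ [ti.2] else p.1,
   if PySem.Str.isIn "Buzz" ti.1 then p.2 ++ [ti.2] else p.2)

def solve (arr : String) : Bool :=
  let toks := PySem.Str.split₀ arr
  let int_arr0 : List (Option Int) :=
    toks.map (fun t => if PySem.Str.strIsdigit t then some (pyIntOf t) else none)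
  let int_arr : List (Option Int) :=
    match solveFindA int_arr0 0 with
    | some (v, i) => (PySem.List.pyRange (v - i) (v - i + (int_arr0.length : Int)) 1).map some
    | none => int_arr0
  let fb := (toks.zip int_arr).foldl aStep ([], [])
  if fb.1.isEmpty && fb.2.isEmpty then true
  else if gcdL fb.1 == 1 || gcdL fb.2 == 1 then false
  else true

-- ===== PORT B =====
-- B's start search: start = int(t) - j for the first digit token (None if there is none)
def solveAltStart : List String → Int → Option Int
  | [], _ => none
  | t :: rest, j => if PySem.Str.strIsdigit t then some (pyIntOf t - j) else solveAltStart rest (j + 1)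

-- B's helper g(idxs): gcd of the reconstructed values as gcd(anchor value, gaps between positions);
-- start.getD 0 + j0 is Python's start + idxs[0] (None raises TypeError, outside Pre_solve)
def gIdx (start : Option Int) (idxs : List Int) : Nat :=
  match idxs with
  | [] => 0
  | j0 :: _ =>
      let d := (idxs.zip idxs.tail).foldl (fun d ab => Nat.gcd d (ab.2 - ab.1).natAbs) 0
      Nat.gcd (start.getD 0 + j0).natAbs d

def solve_alt (arr : String) : Bool :=
  let toks := PySem.Str.split₀ arr
  let fizz := ((PySem.List.enumerate toks 0).filter (fun jt => PySem.Str.isIn "Fizz" jt.2)).map (·.1)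
  let buzz := ((PySem.List.enumerate toks 0).filter (fun jt => PySem.Str.isIn "Buzz" jt.2)).map (·.1)
  if fizz.isEmpty && buzz.isEmpty then true
  else
    let start := solveAltStart toks 0
    !(gIdx start fizz == 1) && !(gIdx start buzz == 1)

-- ===== PRECONDITION & SPEC =====
-- Pre_ excludes exactly the inputs where A raises TypeError: a Fizz/Buzz token present but no all-digit token
-- (None values then flow into math.gcd); B raises the same TypeError there.
def Pre_solve (arr : String) : Prop :=
  (∀ t ∈ PySem.Str.split₀ arr,
      PySem.Str.isIn "Fizz" t = false ∧ PySem.Str.isIn "Buzz" t = false)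
  ∨ (∃ t ∈ PySem.Str.split₀ arr, PySem.Str.strIsdigit t = true)
instance (arr : String) : Decidable (Pre_solve arr) := by unfold Pre_solve; infer_instance

def pvWitness_solve : String := "1 2 Fizz 4 Buzz"

def Spec_solve (arr : String) (out : Bool) : Prop := out = solve_alt arr
instance (arr : String) (out : Bool) : Decidable (Spec_solve arr out) := by unfold Spec_solve; infer_instance

-- ===== CLAIM (what is proved, stated in full; the proofs are below) =====
def Claim_equal_solve : Prop := ∀ (arr : String), Dom_solve arr → Pre_solve arr → Spec_solve arr (solve arr)

-- ===== LEMMAS AND PROOFS =====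

theorem findA_eq_start (toks : List String) (i : Int) :
    solveAltStart toks i =
      (solveFindA (toks.map (fun t => if PySem.Str.strIsdigit t then some (pyIntOf t) else none)) i).map
        (fun p => p.1 - p.2) := by
  induction toks generalizing i with
  | nil => simp [solveAltStart, solveFindA]
  | cons t rest ih =>
    by_cases h : PySem.Chars.strIsdigit t.toList
    · simp [solveAltStart, solveFindA, h]
    · simp [solveAltStart, solveFindA, h, ih]

theorem start_none_no_digit (toks : List String) (i : Int)
    (h : solveAltStart toks i = none) : ∀ t ∈ toks, PySem.Str.strIsdigit t = false := by
  induction toks generalizing i with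
  | nil => simp
  | cons t rest ih =>
    intro u hu
    by_cases hd : PySem.Chars.strIsdigit t.toList
    · simp [solveAltStart, hd] at h
    · rcases List.mem_cons.mp hu with rfl | hu
      · simpa using hd
      · exact ih (i + 1) (by simpa [solveAltStart, hd] using h) u hu

-- A's (token, value) pair list after the rebuild, as a structural recursion
def valsFrom (s0 : Int) : List String → Int → List (String × Option Int)
  | [], _ => []
  | t :: rest, j => (t, some (s0 + j)) :: valsFrom s0 rest (j + 1)

theorem zip_range_eq_valsFrom (s0 : Int) (toks : List String) (j : Int) :
    toks.zip ((PySem.List.pyRange (s0 + j) (s0 + j + (toks.length : Int)) 1).map some) =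
      valsFrom s0 toks j := by
  induction toks generalizing j with
  | nil => simp [valsFrom]
  | cons t rest ih =>
    have h1 : s0 + j < s0 + j + ((t :: rest).length : Int) := by
      simp only [List.length_cons]; push_cast; omega
    rw [PySem.List.pyRange_one_cons h1]
    simp only [List.map_cons, List.zip_cons_cons, valsFrom]
    congr 1
    have harg1 : s0 + j + 1 = s0 + (j + 1) := by ring
    have harg2 : s0 + j + (((t :: rest).length : Nat) : Int) = s0 + (j + 1) + (rest.length : Int) := by
      simp only [List.length_cons]; push_cast; ring
    rw [harg1, harg2]
    exact ih (j + 1)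

theorem no_fb_a_fold (L : List (String × Option Int)) (F B : List (Option Int))
    (h : ∀ p ∈ L, PySem.Str.isIn "Fizz" p.1 = false ∧ PySem.Str.isIn "Buzz" p.1 = false) :
    L.foldl aStep (F, B) = (F, B) := by
  induction L generalizing F B with
  | nil => rfl
  | cons p rest ih =>
    have hp := h p (by simp)
    simp only [List.foldl_cons, aStep, hp.1, hp.2, Bool.false_eq_true, reduceIte]
    exact ih F B (fun q hq => h q (by simp [hq]))

-- A's collection loop over valsFrom builds exactly the anchored values at the filtered indices
theorem aFold_eq (s0 : Int) (toks : List String) (j : Int) (F B : List (Option Int)) :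
    (valsFrom s0 toks j).foldl aStep (F, B) =
      (F ++ ((((PySem.List.enumerate toks j).filter (fun jt => PySem.Str.isIn "Fizz" jt.2)).map (·.1)).map
          (fun i => some (s0 + i))),
       B ++ ((((PySem.List.enumerate toks j).filter (fun jt => PySem.Str.isIn "Buzz" jt.2)).map (·.1)).map
          (fun i => some (s0 + i)))) := by
  induction toks generalizing j F B with
  | nil => simp [valsFrom, PySem.List.enumerate_nil]
  | cons t rest ih =>
    rw [PySem.List.enumerate_cons]
    simp only [valsFrom, List.foldl_cons, aStep, List.filter_cons]
    by_cases hF : PySem.Str.isIn "Fizz" t = true <;>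
      by_cases hB : PySem.Str.isIn "Buzz" t = true <;>
        simp only [hF, hB, Bool.false_eq_true, if_true, if_false] <;>
        simp [ih]

theorem no_fb_filter_nil (P : String → Bool) (toks : List String) (j : Int)
    (h : ∀ t ∈ toks, P t = false) :
    (PySem.List.enumerate toks j).filter (fun jt => P jt.2) = [] := by
  induction toks generalizing j with
  | nil => simp [PySem.List.enumerate_nil]
  | cons t rest ih =>
    rw [PySem.List.enumerate_cons]
    simp [h t (by simp), ih (j + 1) (fun u hu => h u (by simp [hu]))]

theorem gcd_foldl_extract {α : Type} (f : α → Nat) (l : List α) (a : Nat) :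
    l.foldl (fun g x => Nat.gcd g (f x)) a = Nat.gcd a (l.foldl (fun g x => Nat.gcd g (f x)) 0) := by
  induction l generalizing a with
  | nil => simp
  | cons x l ih =>
    simp only [List.foldl_cons]
    rw [ih, ih (Nat.gcd 0 (f x)), Nat.gcd_zero_left, Nat.gcd_assoc]

theorem gcd_abs_sub (a b : Int) (x : Nat) :
    Nat.gcd a.natAbs (Nat.gcd (b - a).natAbs x) = Nat.gcd a.natAbs (Nat.gcd b.natAbs x) := by
  rw [← Nat.gcd_assoc, ← Nat.gcd_assoc]
  congr 1
  exact Int.gcd_sub_self_right a b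

-- gcd(v0,..,vk) = gcd(v0, gaps), for values vi = s0 + ji
theorem vgcd_eq_gaps (s0 : Int) (j0 : Int) (rest : List Int) :
    (j0 :: rest).foldl (fun g i => Nat.gcd g (s0 + i).natAbs) 0 =
      Nat.gcd (s0 + j0).natAbs
        (((j0 :: rest).zip rest).foldl (fun d ab => Nat.gcd d (ab.2 - ab.1).natAbs) 0) := by
  induction rest generalizing j0 with
  | nil => simp
  | cons j1 r ih =>
    have lhs : (j0 :: j1 :: r).foldl (fun g i => Nat.gcd g (s0 + i).natAbs) 0 =
        Nat.gcd (s0 + j0).natAbs ((j1 :: r).foldl (fun g i => Nat.gcd g (s0 + i).natAbs) 0) := by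
      simp only [List.foldl_cons]
      rw [gcd_foldl_extract (fun i : Int => (s0 + i).natAbs) r, Nat.gcd_zero_left,
        Nat.gcd_assoc, ← gcd_foldl_extract (fun i : Int => (s0 + i).natAbs) r]
      simp
    rw [lhs, ih]
    have rhs : (((j0 :: j1 :: r).zip (j1 :: r)).foldl (fun d ab => Nat.gcd d (ab.2 - ab.1).natAbs) 0) =
        Nat.gcd (j1 - j0).natAbs
          (((j1 :: r).zip r).foldl (fun d ab => Nat.gcd d (ab.2 - ab.1).natAbs) 0) := by
      rw [List.zip_cons_cons, List.foldl_cons,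
        gcd_foldl_extract (fun ab : Int × Int => (ab.2 - ab.1).natAbs)]
      simp
    rw [rhs]
    have : (j1 - j0).natAbs = ((s0 + j1) - (s0 + j0)).natAbs := by
      congr 1; ring
    rw [this]
    exact (gcd_abs_sub (s0 + j0) (s0 + j1) _).symm

theorem gcdL_map_eq_gIdx (s0 : Int) (idxs : List Int) :
    gcdL (idxs.map (fun i => some (s0 + i))) = gIdx (some s0) idxs := by
  cases idxs with
  | nil => rfl
  | cons j0 rest =>
    unfold gcdL gIdx
    rw [List.foldl_map]
    simpa using vgcd_eq_gaps s0 j0 rest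

-- ===== VERDICT (by name: the statement is the Claim_ definition above) =====
theorem solve_spec : Claim_equal_solve := by
  intro arr _ hpre
  unfold Spec_solve
  simp only [solve, solve_alt]
  set toks := PySem.Str.split₀ arr with htoks
  rcases hS : solveAltStart toks 0 with _ | s0
  -- no digit token: A's find fails too; Pre_ forces no Fizz/Buzz tokens, both return True
  · have hnd := start_none_no_digit toks 0 hS
    have hfind : solveFindA (toks.map
        (fun t => if PySem.Str.strIsdigit t then some (pyIntOf t) else none)) 0 = none := by
      have heq := findA_eq_start toks 0
      rw [hS] at heq
      cases hfa : solveFindA (toks.map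
          (fun t => if PySem.Str.strIsdigit t then some (pyIntOf t) else none)) 0 with
      | none => rfl
      | some p => rw [hfa] at heq; simp at heq
    have hnofb : ∀ t ∈ toks, PySem.Str.isIn "Fizz" t = false ∧ PySem.Str.isIn "Buzz" t = false := by
      rcases hpre with h | ⟨t, ht, hd⟩
      · exact h
      · rw [hnd t ht] at hd; simp at hd
    simp only [hfind]
    rw [no_fb_a_fold _ [] [] (fun p hp => hnofb p.1 (List.of_mem_zip hp).1)]
    rw [no_fb_filter_nil _ toks 0 (fun t ht => (hnofb t ht).1),
      no_fb_filter_nil _ toks 0 (fun t ht => (hnofb t ht).2)]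
    simp
  -- a digit token exists: A rebuilds range(start, start+len); B gcds the anchor and the gaps
  · rcases hfind' : solveFindA (toks.map
        (fun t => if PySem.Str.strIsdigit t then some (pyIntOf t) else none)) 0 with _ | p
    · exfalso
      have heq := findA_eq_start toks 0
      rw [hS, hfind'] at heq; simp at heq
    · obtain ⟨v, i⟩ := p
      have hs0 : s0 = v - i := by
        have heq := findA_eq_start toks 0
        rw [hS, hfind'] at heq
        simpa using heq
      have hzip := zip_range_eq_valsFrom (v - i) toks 0
      rw [show v - i + 0 = v - i by ring] at hzip
      simp only [List.length_map]
      rw [hzip, aFold_eq (v - i) toks 0 [] []]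
      simp only [List.nil_append, List.isEmpty_map, gcdL_map_eq_gIdx, hs0]
      set fI := (((PySem.List.enumerate toks 0).filter (fun jt => PySem.Str.isIn "Fizz" jt.2)).map (·.1))
      set bI := (((PySem.List.enumerate toks 0).filter (fun jt => PySem.Str.isIn "Buzz" jt.2)).map (·.1))
      cases h1 : fI.isEmpty <;> cases h2 : bI.isEmpty <;>
        cases hg1 : (gIdx (some (v - i)) fI == 1) <;> cases hg2 : (gIdx (some (v - i)) bI == 1) <;>
          simp_all
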